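-- pv_equiv track=rewrite | github.com/fastzip/fastzip | fastzip/_crc32_combine.py | _crc32_combine_pure
-- ===== SOURCE A (Python) =====
-- from typing import List
--
-- def _crc32_combine_pure(crc1: int, crc2: int, len2: int) -> int:
--     """
--     Algorithm explanation: https://stackoverflow.com/a/23126768/654160
--     crc32(crc32(0, seq1, len1), seq2, len2) == crc32_combine(
--         crc32(0, seq1, len1), crc32(0, seq2, len2), len2)
--     Borrowed from https://stackoverflow.com/a/35387040/2267932
--     """
--     # degenerate case (also disallow negative lengths)
--     if len2 <= 0:
--         return crc1
--
--     # put operator for one zero bit in odd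
--     # CRC-32 polynomial, 1, 2, 4, 8, ..., 1073741824
--     odd = [0xEDB88320] + [1 << i for i in range(0, 31)]
--     even = [0] * 32
--
--     def matrix_times(matrix: List[int], vector: int) -> int:
--         number_sum = 0
--         matrix_index = 0
--         while vector != 0:
--             if vector & 1:
--                 number_sum ^= matrix[matrix_index]
--             vector = vector >> 1 & 0x7FFFFFFF
--             matrix_index += 1
--         return number_sum
--
--     # put operator for two zero bits in even - gf2_matrix_square(even, odd)
--     even[:] = [matrix_times(odd, odd[n]) for n in range(0, 32)]
--
--     # put operator for four zero bits in odd
--     odd[:] = [matrix_times(even, even[n]) for n in range(0, 32)]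
--
--     # apply len2 zeros to crc1 (first square will put the operator for one
--     # zero byte, eight zero bits, in even)
--     while len2 != 0:
--         # apply zeros operator for this bit of len2
--         even[:] = [matrix_times(odd, odd[n]) for n in range(0, 32)]
--         if len2 & 1:
--             crc1 = matrix_times(even, crc1)
--         len2 >>= 1
--
--         # if no more bits set, then done
--         if len2 == 0:
--             break
--
--         # another iteration of the loop with odd and even swapped
--         odd[:] = [matrix_times(even, even[n]) for n in range(0, 32)]
--         if len2 & 1:
--             crc1 = matrix_times(odd, crc1)
--         len2 >>= 1
--
--         # if no more bits set, then done
--     # return combined crc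
--     crc1 ^= crc2
--     return crc1
-- ===== SOURCE B (Python) =====
-- def _crc32_combine_pure(crc1: int, crc2: int, len2: int) -> int:
--     # degenerate case (also disallow negative lengths)
--     if len2 <= 0:
--         return crc1
--
--     def gf2_mul(a: int, b: int) -> int:
--         # Carry-less product of a and b modulo the (reflected) CRC-32 polynomial.
--         # Reads the bits of a from the low end; b is repeatedly multiplied by
--         # x^-1 (reflected shift left with reduction).
--         prod = 0
--         a &= 0xFFFFFFFF
--         while a:
--             if a & 1:
--                 prod ^= b
--             a >>= 1
--             b = (((b ^ 0xEDB88320) << 1) | 1) if (b >> 31) & 1 else (b << 1)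
--         return prod
--
--     # operator word for one zero bit; cube by squaring three times -> one zero byte
--     q = 0xEDB88320
--     q = gf2_mul(q, q)
--     q = gf2_mul(q, q)
--     q = gf2_mul(q, q)
--
--     # square-and-multiply over the bits of len2
--     while len2:
--         if len2 & 1:
--             crc1 = gf2_mul(crc1, q)
--         q = gf2_mul(q, q)
--         len2 >>= 1
--     return crc1 ^ crc2
-- ===== Notes on version B (the rewrite author's own statement) =====
-- stated objective: faster
-- what changed: Replaces A's 32x32 GF(2) matrix representation of the zero-stuffing operator (lists of 32 words, matrix squaring via 32 matrix-vector products per step) by a single 32-bit polynomial word with a carry-less multiply modulo the CRC-32 polynomial; squaring an operator and applying it to the crc each become one O(32) word loop instead of O(32^2)/O(32) matrix work.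
import Mathlib
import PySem

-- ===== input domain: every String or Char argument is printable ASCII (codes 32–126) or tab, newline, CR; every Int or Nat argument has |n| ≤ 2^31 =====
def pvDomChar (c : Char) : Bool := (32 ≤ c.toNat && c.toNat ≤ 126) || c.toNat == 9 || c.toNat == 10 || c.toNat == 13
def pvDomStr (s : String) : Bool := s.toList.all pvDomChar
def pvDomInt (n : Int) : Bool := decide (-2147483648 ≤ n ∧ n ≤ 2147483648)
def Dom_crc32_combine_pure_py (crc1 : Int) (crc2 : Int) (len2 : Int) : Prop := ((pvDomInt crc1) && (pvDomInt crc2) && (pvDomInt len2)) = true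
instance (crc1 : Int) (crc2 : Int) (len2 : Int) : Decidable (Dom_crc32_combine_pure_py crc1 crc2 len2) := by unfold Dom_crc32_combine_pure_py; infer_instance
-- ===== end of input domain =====

-- B replaces A's 32x32 GF(2) matrix representation of the zero-stuffing operator by a single
-- 32-bit polynomial word with a carry-less multiply modulo the CRC-32 polynomial (objective: faster).

-- ===== PORT A =====
-- The while loop of `matrix_times` is ported with fuel 64: after one step the vector lies in
-- [0, 2^31) ((v >> 1) & 0x7FFFFFFF) and then strictly halves, so the Python loop always ends
-- within <= 33 iterations; the fuel is never exhausted.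
def mtLoop (fuel : Nat) (matrix : List Int) (vector : Int)
    (number_sum : Int) (matrix_index : Nat) : Int :=
  match fuel with
  | 0 => number_sum
  | fuel + 1 =>
    if vector = 0 then number_sum
    else
      let number_sum := if PySem.Int.band vector 1 ≠ 0
        then PySem.Int.bxor number_sum (matrix.getD matrix_index 0) else number_sum
      mtLoop fuel matrix (PySem.Int.band (vector >>> (1:Nat)) 0x7FFFFFFF) number_sum (matrix_index + 1)

def matrix_times (matrix : List Int) (vector : Int) : Int :=
  mtLoop 64 matrix vector 0 0

-- the comprehension `[matrix_times(m, m[n]) for n in range(32)]`;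
-- `m.getD n 0` is Python's in-range `m[n]` (all matrices here have 32 entries, n < 32)
def gf2_square (m : List Int) : List Int :=
  (List.range 32).map (fun n => matrix_times m (m.getD n 0))

-- operator for one zero bit: [0xEDB88320] + [1 << i for i in range(0, 31)]
def oneBitOperator : List Int :=
  0xEDB88320 :: (List.range 31).map (fun i => ((1 : Int) <<< i))

-- A's `while len2 != 0` loop (two bits per iteration, even/odd swapped); after the
-- `len2 <= 0` guard Python's len2 is a positive int, represented as a Nat (so Python's
-- `len2 & 1` is `n &&& 1` and `len2 >>= 1` is `n >>> 1`, exactly).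
def aLoop (odd : List Int) (n : Nat) (crc1 : Int) : Int :=
  if n = 0 then crc1
  else
    let even := gf2_square odd
    let crc1 := if n &&& 1 ≠ 0 then matrix_times even crc1 else crc1
    let n := n >>> 1
    if n = 0 then crc1
    else
      let odd := gf2_square even
      let crc1 := if n &&& 1 ≠ 0 then matrix_times odd crc1 else crc1
      aLoop odd (n >>> 1) crc1
termination_by n
decreasing_by simp only [Nat.shiftRight_one]; omega

def crc32_combine_pure_py (crc1 : Int) (crc2 : Int) (len2 : Int) : Int :=
  if len2 ≤ 0 then crc1
  else
    let odd := oneBitOperator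
    let even := gf2_square odd       -- operator for two zero bits
    let odd := gf2_square even       -- operator for four zero bits
    PySem.Int.bxor (aLoop odd len2.toNat crc1) crc2

-- ===== PORT B =====
-- B's inline conditional `(((b ^ 0xEDB88320) << 1) | 1) if (b >> 31) & 1 else (b << 1)`
def bstep (b : Int) : Int :=
  if PySem.Int.band (b >>> (31:Nat)) 1 ≠ 0
  then PySem.Int.bor ((PySem.Int.bxor b 0xEDB88320) <<< (1:Nat)) 1
  else b <<< (1:Nat)

-- B's `while a:` loop, fuel 64: a starts masked into [0, 2^32) and halves each step,
-- so the Python loop always ends within <= 33 iterations; the fuel is never exhausted.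
def gmLoop (fuel : Nat) (a : Int) (prod : Int) (b : Int) : Int :=
  match fuel with
  | 0 => prod
  | fuel + 1 =>
    if a = 0 then prod
    else gmLoop fuel (a >>> (1:Nat))
      (if PySem.Int.band a 1 ≠ 0 then PySem.Int.bxor prod b else prod) (bstep b)

def gf2_mul (a b : Int) : Int :=
  gmLoop 64 (PySem.Int.band a 0xFFFFFFFF) 0 b

-- B's `while len2:` loop (positive len2 carried as a Nat, as in A's port)
def bAltLoop (q : Int) (n : Nat) (crc1 : Int) : Int :=
  if n = 0 then crc1
  else bAltLoop (gf2_mul q q) (n >>> 1)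
    (if n &&& 1 ≠ 0 then gf2_mul crc1 q else crc1)
termination_by n
decreasing_by simp only [Nat.shiftRight_one]; omega

def crc32_combine_pure_py_alt (crc1 : Int) (crc2 : Int) (len2 : Int) : Int :=
  if len2 ≤ 0 then crc1
  else
    let q : Int := 0xEDB88320
    let q := gf2_mul q q
    let q := gf2_mul q q
    let q := gf2_mul q q
    PySem.Int.bxor (bAltLoop q len2.toNat crc1) crc2

-- ===== PRECONDITION & SPEC =====
def Spec_crc32_combine_pure_py (crc1 : Int) (crc2 : Int) (len2 : Int) (out : Int) : Prop := out = crc32_combine_pure_py_alt crc1 crc2 len2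
instance (crc1 : Int) (crc2 : Int) (len2 : Int) (out : Int) : Decidable (Spec_crc32_combine_pure_py crc1 crc2 len2 out) := by unfold Spec_crc32_combine_pure_py; infer_instance

-- ===== CLAIM (what is proved, stated in full; the proofs are below) =====
def Claim_equal_crc32_combine_pure_py : Prop := ∀ (crc1 : Int) (crc2 : Int) (len2 : Int), Dom_crc32_combine_pure_py crc1 crc2 len2 → Spec_crc32_combine_pure_py crc1 crc2 len2 (crc32_combine_pure_py crc1 crc2 len2)

-- ===== LEMMAS AND PROOFS =====

-- masking with an all-ones word is reduction mod a power of two (for every Int, Python-exactly)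
theorem band32_emod (v : Int) : PySem.Int.band v 0xFFFFFFFF = v % 2 ^ 32 := by
  unfold PySem.Int.band
  cases v with
  | ofNat n =>
      simp only [Int.ofNat_eq_natCast]
      rw [if_pos (by positivity), if_pos (by norm_num)]
      rw [show ((0xFFFFFFFF:Int).toNat) = 2^32-1 from rfl, Int.toNat_natCast,
        Nat.and_two_pow_sub_one_eq_mod]
      omega
  | negSucc p =>
      rw [if_neg (by omega), if_pos (by norm_num)]
      rw [show ((0xFFFFFFFF:Int).toNat) = 2^32-1 from rfl,
        show ((-Int.negSucc p - 1).toNat) = p from by omega]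
      rw [Nat.land_comm, Nat.and_two_pow_sub_one_eq_mod]
      omega

theorem band31_emod (v : Int) : PySem.Int.band v 0x7FFFFFFF = v % 2 ^ 31 := by
  unfold PySem.Int.band
  cases v with
  | ofNat n =>
      simp only [Int.ofNat_eq_natCast]
      rw [if_pos (by positivity), if_pos (by norm_num)]
      rw [show ((0x7FFFFFFF:Int).toNat) = 2^31-1 from rfl, Int.toNat_natCast,
        Nat.and_two_pow_sub_one_eq_mod]
      omega
  | negSucc p =>
      rw [if_neg (by omega), if_pos (by norm_num)]
      rw [show ((0x7FFFFFFF:Int).toNat) = 2^31-1 from rfl,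
        show ((-Int.negSucc p - 1).toNat) = p from by omega]
      rw [Nat.land_comm, Nat.and_two_pow_sub_one_eq_mod]
      omega

-- Python's `v & 1` as parity
theorem band1_emod (v : Int) : PySem.Int.band v 1 = v % 2 := by
  rw [PySem.Int.band_one]
  exact PySem.Int.mod_eq_emod_of_pos (by norm_num)

theorem int_shiftRight_one (v : Int) : v >>> (1:Nat) = v / 2 := by
  simpa using Int.shiftRight_eq_div_pow v 1

-- b after i steps of B's inline multiply-by-x⁻¹ update
def bstepPow : Nat → Int → Int
  | 0, b => b
  | i + 1, b => bstepPow i (bstep b)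

-- the 32 columns of the matrix that corresponds to the polynomial word q
def colsOf (q : Int) : List Int := (List.range 32).map (fun i => bstepPow i q)

-- one Bool that checks the whole 32-step correspondence chain (matrix squarings vs word squarings)
def chainOK : Nat → List Int → Int → Bool
  | 0, _, _ => true
  | k + 1, M, q => (decide (M = colsOf q)) && chainOK k (gf2_square M) (gf2_mul q q)

theorem mtLoop_zero (fuel : Nat) (M : List Int) (acc : Int) (idx : Nat) :
    mtLoop fuel M 0 acc idx = acc := by
  cases fuel <;> simp [mtLoop]

-- lockstep run of the two inner loops once the vector is a nonnegative (r ≤ 31)-bit value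
theorem lockstep : ∀ (fuel idx r : Nat) (w acc : Int) (M : List Int) (b : Int),
    idx + r = 32 → 1 ≤ idx → 0 ≤ w → w < 2 ^ r →
    (∀ i, i < r → M.getD (idx + i) 0 = bstepPow i b) →
    mtLoop fuel M w acc idx = gmLoop fuel w acc b := by
  intro fuel
  induction fuel with
  | zero => intros; rfl
  | succ fuel ih =>
    intro idx r w acc M b hir hidx hw0 hwlt hcols
    rw [mtLoop, gmLoop]
    by_cases hw : w = 0
    · simp [hw]
    · simp only [if_neg hw]
      have hr : r ≠ 0 := by
        rintro rfl
        norm_num at hwlt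
        omega
      have h2r : (2:Int) ^ r = 2 * 2 ^ (r - 1) := by
        rw [← pow_succ']
        congr 1
        omega
      have h2b : (2:Int) ^ (r-1) ≤ 2 ^ 31 := by
        apply pow_le_pow_right₀ (by norm_num)
        omega
      have hshift : w >>> (1:Nat) = w / 2 := int_shiftRight_one w
      have hmask : PySem.Int.band (w >>> (1:Nat)) 0x7FFFFFFF = w >>> (1:Nat) := by
        rw [band31_emod, hshift]
        apply Int.emod_eq_of_lt (by omega)
        have : (2:Int)^31 = 2147483648 := by norm_num
        omega
      have hacc : M.getD idx 0 = b := by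
        have := hcols 0 (by omega)
        simpa [bstepPow] using this
      rw [hmask, hacc]
      apply ih (idx+1) (r-1) _ _ _ (bstep b) (by omega) (by omega)
        (by rw [hshift]; omega) (by rw [hshift]; omega)
      intro i hi
      have := hcols (i+1) (by omega)
      rw [show idx + 1 + i = idx + (i+1) from by omega]
      rw [this]
      rfl

-- applying the matrix M with columns `colsOf q` is B's carry-less multiplication by q
theorem applyAgree (M : List Int) (q v : Int) (h : M = colsOf q) :
    matrix_times M v = gf2_mul v q := by
  have hcols : ∀ i, i < 32 → M.getD i 0 = bstepPow i q := by
    intro i hi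
    subst h
    unfold colsOf
    rw [List.getD_eq_getElem?_getD, List.getElem?_map, List.getElem?_range hi]
    rfl
  unfold matrix_times gf2_mul
  rw [band32_emod, show (64:Nat) = 63+1 from rfl, mtLoop, gmLoop]
  have h32 : (2:Int)^32 = 4294967296 := by norm_num
  have h31 : (2:Int)^31 = 2147483648 := by norm_num
  by_cases hv : v = 0
  · simp [hv]
  · simp only [if_neg hv]
    have hb1 : PySem.Int.band v 1 = PySem.Int.band (v % 2^32) 1 := by
      rw [band1_emod, band1_emod, Int.emod_emod_of_dvd v (by norm_num)]
    have hb2 : PySem.Int.band (v >>> (1:Nat)) 0x7FFFFFFF = (v % 2^32) >>> (1:Nat) := by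
      rw [band31_emod, int_shiftRight_one, int_shiftRight_one]
      omega
    by_cases ha : v % 2^32 = 0
    · rw [if_pos ha]
      have hacc : (if PySem.Int.band v 1 ≠ 0 then PySem.Int.bxor 0 (M.getD 0 0) else 0) = 0 := by
        rw [hb1, ha]
        simp [band1_emod]
      rw [hacc, hb2, ha]
      simpa using mtLoop_zero 63 M 0 1
    · rw [if_neg ha, hb1, hb2]
      have hg0 : M.getD 0 0 = q := by
        have := hcols 0 (by norm_num)
        simpa [bstepPow] using this
      rw [hg0]
      apply lockstep 63 1 31 _ _ _ (bstep q) (by norm_num) (by norm_num)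
        (by rw [int_shiftRight_one]; omega) (by rw [int_shiftRight_one]; omega)
      intro i hi
      have := hcols (i+1) (by omega)
      rw [show 1 + i = 0 + (i+1) from by omega, show (0:Nat) + (i+1) = i+1 from by omega, this]
      rfl

-- flat one-bit-per-iteration form of A's loop (proof helper)
def mFlat (M : List Int) (n : Nat) (crc : Int) : Int :=
  if n = 0 then crc
  else mFlat (gf2_square M) (n >>> 1)
    (if n &&& 1 ≠ 0 then matrix_times M crc else crc)
termination_by n
decreasing_by simp only [Nat.shiftRight_one]; omega

-- A's double-buffer loop starting from operator `odd` equals the flat loop started one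
-- squaring further on
theorem aLoop_eq_mFlat (n : Nat) : ∀ (odd : List Int) (crc1 : Int),
    aLoop odd n crc1 = mFlat (gf2_square odd) n crc1 := by
  induction n using Nat.strong_induction_on with
  | _ n ih =>
    intro odd crc1
    rw [aLoop, mFlat]
    by_cases h : n = 0
    · simp [h]
    · simp only [if_neg h]
      by_cases h2 : n >>> 1 = 0
      · rw [h2, mFlat]
        simp
      · simp only [if_neg h2]
        rw [mFlat, if_neg h2]
        rw [ih (n >>> 1 >>> 1) (by simp only [Nat.shiftRight_one]; omega)]

-- the two outer loops agree as long as the verified chain is long enough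
theorem mainLoop (k : Nat) : ∀ (M : List Int) (q : Int) (n : Nat) (crc : Int),
    n < 2 ^ k → chainOK k M q = true → mFlat M n crc = bAltLoop q n crc := by
  induction k with
  | zero =>
    intro M q n crc hn _
    have hn0 : n = 0 := by omega
    subst hn0
    rw [mFlat, bAltLoop]
    simp
  | succ k ih =>
    intro M q n crc hn hc
    rw [chainOK] at hc
    simp only [Bool.and_eq_true, decide_eq_true_eq] at hc
    obtain ⟨hM, hrest⟩ := hc
    rw [mFlat, bAltLoop]
    by_cases hn0 : n = 0
    · simp [hn0]
    · simp only [if_neg hn0]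
      rw [applyAgree M q crc hM]
      apply ih _ _ _ _ _ hrest
      have : 2 ^ (k+1) = 2 * 2 ^ k := by rw [pow_succ]; ring
      simp only [Nat.shiftRight_one]
      omega

set_option maxRecDepth 100000 in
set_option maxHeartbeats 4000000 in
theorem chainFact :
    chainOK 32 (gf2_square (gf2_square (gf2_square oneBitOperator)))
      (gf2_mul (gf2_mul (gf2_mul 0xEDB88320 0xEDB88320) (gf2_mul 0xEDB88320 0xEDB88320))
        (gf2_mul (gf2_mul 0xEDB88320 0xEDB88320) (gf2_mul 0xEDB88320 0xEDB88320))) = true := by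
  decide

-- ===== VERDICT (by name: the statement is the Claim_ definition above) =====
theorem crc32_combine_pure_py_spec : Claim_equal_crc32_combine_pure_py := by
  unfold Claim_equal_crc32_combine_pure_py
  intro crc1 crc2 len2 hdom
  unfold Spec_crc32_combine_pure_py crc32_combine_pure_py crc32_combine_pure_py_alt
  by_cases h : len2 ≤ 0
  · simp [h]
  · simp only [if_neg h]
    congr 1
    rw [aLoop_eq_mFlat]
    apply mainLoop 32 _ _ _ _ _ chainFact
    have hle : len2 ≤ 2147483648 := by
      unfold Dom_crc32_combine_pure_py pvDomInt at hdom
      simp only [Bool.and_eq_true, decide_eq_true_eq] at hdom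
      omega
    have : (2:Nat)^32 = 4294967296 := by norm_num
    omega
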